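-- pv_equiv track=rewrite | github.com/likwidoxigen/PythonExercises | AdventOfCode/Day11/seating.py | checkDown2
-- ===== SOURCE A (Python) =====
-- def isOccupied2(arr,x,y):
--     if arr[y][x] == "#":
--         return 1
--     elif arr[y][x] == "L":
--         return 0
--     else:
--         return 5
--
-- def checkDown2(arr,x,y):
--     x = x
--     y = y-1
--     if x < 0 or x > len(arr[0])-1 or y > len(arr)-1 or y < 0:
--         return 0
--     else:
--         test =  isOccupied2(arr,x,y)
--         if test == 5:
--             return checkDown2(arr,x,y)
--         else:
--             return test
-- ===== SOURCE B (Python) =====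
-- def checkDown2(arr, x, y):
--     if x < 0 or x >= len(arr[0]) or y > len(arr) or y < 1:
--         return 0
--     column = [row[x] for row in arr[:y]]
--     seat = next((c for c in reversed(column) if c in ("#", "L")), None)
--     return 1 if seat == "#" else 0
-- ===== Notes on version B (the rewrite author's own statement) =====
-- stated objective: alternative
-- what changed: A's tail recursion with the sentinel value 5 routed through isOccupied2 is replaced by a staged loop-free pipeline: check the bounds once, materialise the column slice [row[x] for row in arr[:y]], and take the first seat character ('#' or 'L') of the reversed column with next().
-- outside the precondition, e.g. on checkDown2([['L', '.'], ['#', 'L'], ['.']], 1, 2): A returns 0, B returns 0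
import Mathlib
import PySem

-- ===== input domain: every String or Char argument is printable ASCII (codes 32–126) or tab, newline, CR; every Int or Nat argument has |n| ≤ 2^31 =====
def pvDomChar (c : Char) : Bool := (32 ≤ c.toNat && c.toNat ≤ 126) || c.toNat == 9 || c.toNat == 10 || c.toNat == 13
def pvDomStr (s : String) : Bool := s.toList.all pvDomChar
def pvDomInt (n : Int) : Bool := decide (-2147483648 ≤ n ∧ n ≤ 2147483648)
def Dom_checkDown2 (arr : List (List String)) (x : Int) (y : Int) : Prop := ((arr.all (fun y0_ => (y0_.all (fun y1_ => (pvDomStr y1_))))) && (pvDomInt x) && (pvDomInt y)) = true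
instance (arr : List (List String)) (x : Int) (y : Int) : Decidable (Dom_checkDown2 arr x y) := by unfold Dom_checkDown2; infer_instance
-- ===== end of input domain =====

-- B replaces A's sentinel-value tail recursion by a staged loop-free pipeline (bounds check, column slice, first seat of the reversed column); objective: alternative.


-- ===== PORT A =====
-- arr[y][x]; the `getD` defaults are only reached where the Python raises IndexError (outside Pre_).
def isOccupied2 (arr : List (List String)) (x : Int) (y : Int) : Int :=
  let c := (PySem.List.pyGet? ((PySem.List.pyGet? arr y).getD []) x).getD ""
  if c = "#" then 1 else if c = "L" then 0 else 5

def checkDown2 (arr : List (List String)) (x : Int) (y : Int) : Int :=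
  let y' := y - 1
  if x < 0 ∨ x > (((PySem.List.pyGet? arr 0).getD []).length : Int) - 1
      ∨ y' > (arr.length : Int) - 1 ∨ y' < 0 then 0
  else
    let test := isOccupied2 arr x y'
    if test = 5 then checkDown2 arr x y' else test
termination_by y.toNat
decreasing_by omega

-- ===== PORT B =====
-- arr[:y] with 1 ≤ y is List.take y.toNat; next((c for … if c in ("#","L")), None) is find?; seat == "#" is the final test.
def checkDown2_alt (arr : List (List String)) (x : Int) (y : Int) : Int :=
  if x < 0 ∨ x ≥ (((PySem.List.pyGet? arr 0).getD []).length : Int)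
      ∨ y > (arr.length : Int) ∨ y < 1 then 0
  else
    let column := (arr.take y.toNat).map (fun row => (PySem.List.pyGet? row x).getD "")
    let seat := column.reverse.find? (fun c => c == "#" || c == "L")
    if seat = some "#" then 1 else 0

-- ===== PRECONDITION & SPEC =====
-- Pre_ excludes empty grids, on which Python A raises IndexError evaluating len(arr[0]), and ragged
-- grids containing a row of length ≤ x when the scan actually starts: there A may raise IndexError
-- mid-scan, and where it happens to stop early and return, that value is excluded with it.
def Pre_checkDown2 (arr : List (List String)) (x : Int) (y : Int) : Prop :=
  arr ≠ [] ∧ (x < 0 ∨ x > ((arr.headD []).length : Int) - 1 ∨ y - 1 < 0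
    ∨ y - 1 > (arr.length : Int) - 1 ∨ ∀ row ∈ arr, x < (row.length : Int))
instance (arr : List (List String)) (x : Int) (y : Int) : Decidable (Pre_checkDown2 arr x y) := by
  unfold Pre_checkDown2; infer_instance

def pvWitness_checkDown2 : List (List String) × Int × Int := ([[".", "#"], ["L", "."]], 1, 2)

def Spec_checkDown2 (arr : List (List String)) (x : Int) (y : Int) (out : Int) : Prop := out = checkDown2_alt arr x y
instance (arr : List (List String)) (x : Int) (y : Int) (out : Int) : Decidable (Spec_checkDown2 arr x y out) := by unfold Spec_checkDown2; infer_instance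

-- ===== CLAIM =====
def Claim_equal_checkDown2 : Prop := ∀ (arr : List (List String)) (x : Int) (y : Int), Dom_checkDown2 arr x y → Pre_checkDown2 arr x y → Spec_checkDown2 arr x y (checkDown2 arr x y)

-- ===== LEMMAS AND PROOFS =====

-- A's scan started at y = n (looking at row n-1) equals the first-seat test on the reversed
-- mapped column of the first n rows, once A's x bound holds.
lemma scan_eq (arr : List (List String)) (x : Int)
    (hx : ¬ (x < 0 ∨ x > (((PySem.List.pyGet? arr 0).getD []).length : Int) - 1)) :
    ∀ (n : Nat), n ≤ arr.length →
      checkDown2 arr x (n : Int) =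
        (if ((arr.take n).map (fun row => (PySem.List.pyGet? row x).getD "")).reverse.find?
            (fun c => c == "#" || c == "L") = some "#" then 1 else 0) := by
  intro n
  induction n with
  | zero => intro _; rw [checkDown2]; simp
  | succ k ih =>
    intro hn
    have hk : k < arr.length := by omega
    rw [checkDown2]
    have hcond : ¬ (x < 0 ∨ x > (((PySem.List.pyGet? arr 0).getD []).length : Int) - 1
        ∨ ((k + 1 : Nat) : Int) - 1 > (arr.length : Int) - 1 ∨ ((k + 1 : Nat) : Int) - 1 < 0) := by
      push_neg at hx ⊢
      refine ⟨hx.1, hx.2, by push_cast; omega, by push_cast; omega⟩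
    simp only [hcond, if_false]
    unfold isOccupied2
    have hy : ((k + 1 : Nat) : Int) - 1 = (k : Int) := by push_cast; ring
    rw [hy, PySem.List.pyGet?_natCast]
    have hget : arr[k]? = some arr[k] := List.getElem?_eq_getElem hk
    rw [hget]
    have htake : arr.take (k + 1) = arr.take k ++ [arr[k]] := by
      rw [List.take_add_one, hget]; rfl
    rw [htake, List.map_append, List.reverse_append]
    simp only [List.map_cons, List.map_nil, List.reverse_cons, List.reverse_nil,
      List.nil_append, List.cons_append, List.find?_cons, Option.getD_some]
    by_cases h1 : (PySem.List.pyGet? arr[k] x).getD "" = "#"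
    · simp [h1]
    · by_cases h2 : (PySem.List.pyGet? arr[k] x).getD "" = "L"
      · simp [h2]
      · have hp : ((PySem.List.pyGet? arr[k] x).getD "" == "#"
            || (PySem.List.pyGet? arr[k] x).getD "" == "L") = false := by
          simp [h1, h2]
        simp only [h1, h2, hp, if_false, if_true]
        norm_num
        rw [ih (by omega), List.map_take]

theorem checkDown2_spec : Claim_equal_checkDown2 := by
  intro arr x y _ _
  unfold Spec_checkDown2 checkDown2_alt
  by_cases hb : x < 0 ∨ x ≥ (((PySem.List.pyGet? arr 0).getD []).length : Int)
      ∨ y > (arr.length : Int) ∨ y < 1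
  · rw [if_pos hb, checkDown2]
    rcases hb with h | h | h | h
    · simp [h]
    · have : x > (((PySem.List.pyGet? arr 0).getD []).length : Int) - 1 := by omega
      simp [this]
    · have : y - 1 > (arr.length : Int) - 1 := by omega
      simp [this]
    · have : y - 1 < 0 := by omega
      simp [this]
  · rw [if_neg hb]
    push_neg at hb
    obtain ⟨h1, h2, h3, h4⟩ := hb
    have hx : ¬ (x < 0 ∨ x > (((PySem.List.pyGet? arr 0).getD []).length : Int) - 1) := by
      push_neg; exact ⟨h1, by omega⟩
    have hyy : ((y.toNat : Nat) : Int) = y := by omega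
    have := scan_eq arr x hx y.toNat (by omega)
    rw [hyy] at this
    exact this
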